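-- pv_equiv track=rewrite | github.com/KhawajaAfnan/NLP-Models | q5.py | max_match_segmentation
-- ===== SOURCE A (Python) =====
-- def max_match_segmentation(sentence, word_dict):
--     words = []
--     while sentence:
--         for i in range(len(sentence), 0, -1):
--             word = sentence[:i]
--             if word in word_dict:
--                 words.append(word)
--                 sentence = sentence[i:]
--                 break
--         else:
--             words.append(sentence[0])
--             sentence = sentence[1:]
--     return words
-- ===== SOURCE B (Python) =====
-- def max_match_segmentation(sentence, word_dict):
--     word_set = set(word_dict)
--     max_len = max(map(len, word_dict), default=0)
--     words = []
--     pos = 0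
--     n = len(sentence)
--     while pos < n:
--         k = min(n, pos + max_len)
--         while k > pos and sentence[pos:k] not in word_set:
--             k -= 1
--         if k > pos:
--             words.append(sentence[pos:k])
--             pos = k
--         else:
--             words.append(sentence[pos])
--             pos += 1
--     return words
-- ===== Notes on version B (the rewrite author's own statement) =====
-- stated objective: faster
-- what changed: Index-based scan with a hash set of the dictionary and a precomputed maximum word length, so each position tries at most max_len prefixes with O(1) set lookups instead of rebuilding slices and scanning the whole dictionary list for every candidate length.
import Mathlib
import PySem

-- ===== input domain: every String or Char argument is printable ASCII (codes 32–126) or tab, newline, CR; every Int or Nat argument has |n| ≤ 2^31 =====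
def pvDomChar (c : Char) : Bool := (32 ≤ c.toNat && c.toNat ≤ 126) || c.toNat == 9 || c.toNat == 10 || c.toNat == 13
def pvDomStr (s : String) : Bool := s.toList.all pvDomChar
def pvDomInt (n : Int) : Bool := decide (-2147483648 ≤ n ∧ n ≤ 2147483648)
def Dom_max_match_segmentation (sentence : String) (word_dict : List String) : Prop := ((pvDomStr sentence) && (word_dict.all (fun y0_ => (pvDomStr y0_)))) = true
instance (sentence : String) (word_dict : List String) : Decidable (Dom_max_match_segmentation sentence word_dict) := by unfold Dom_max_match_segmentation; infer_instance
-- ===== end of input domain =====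

-- B replaces A's rescan of the whole dictionary list for every candidate length by an
-- index-based scan with a set of the dictionary and a precomputed maximum word length (faster in a timing run).

-- ===== PORT A =====
-- inner 'for i in range(len(sentence), 0, -1): … break / else' : first i (from above) with sentence[:i] in word_dict
def pvTryA (s : List Char) (word_dict : List String) : Nat → Option Nat
  | 0 => none
  | i + 1 => if String.ofList (s.take (i + 1)) ∈ word_dict then some (i + 1) else pvTryA s word_dict i

theorem pvTryA_bounds {s : List Char} {word_dict : List String} {i j : Nat}
    (h : pvTryA s word_dict i = some j) : 1 ≤ j ∧ j ≤ i := by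
  induction i with
  | zero => simp [pvTryA] at h
  | succ i ih =>
    simp only [pvTryA] at h
    split at h
    · cases h; omega
    · have := ih h; omega

-- 'while sentence: …' over the remaining sentence (as a char list)
def pvGoA (s : List Char) (word_dict : List String) : List String :=
  match s with
  | [] => []
  | c :: rest =>
    match h : pvTryA (c :: rest) word_dict (c :: rest).length with
    | some i => String.ofList ((c :: rest).take i) :: pvGoA ((c :: rest).drop i) word_dict
    | none => String.ofList [c] :: pvGoA rest word_dict
termination_by s.length
decreasing_by
  · have := pvTryA_bounds h
    simp [List.length_drop]; omega
  · simp

def max_match_segmentation (sentence : String) (word_dict : List String) : List String :=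
  pvGoA sentence.toList word_dict

-- ===== PORT B =====
-- inner 'while k > pos and sentence[pos:k] not in word_set: k -= 1'
def pvSearchB (cs : List Char) (wset : PySem.Set String) (pos : Nat) : Nat → Nat
  | 0 => 0
  | k + 1 =>
    if k + 1 > pos then
      if PySem.Set.contains wset (String.ofList ((cs.drop pos).take (k + 1 - pos))) then k + 1
      else pvSearchB cs wset pos k
    else k + 1

theorem pvSearchB_bounds (cs : List Char) (wset : PySem.Set String) (pos k : Nat)
    (hk : pos ≤ k) : pos ≤ pvSearchB cs wset pos k ∧ pvSearchB cs wset pos k ≤ k := by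
  induction k with
  | zero => simp [pvSearchB]; omega
  | succ k ih =>
    simp only [pvSearchB]
    split
    · split
      · omega
      · rcases Nat.lt_or_ge pos (k + 1) with h | h
        · have := ih (by omega); omega
        · omega
    · omega

-- 'while pos < n: …'
def pvGoB (cs : List Char) (wset : PySem.Set String) (maxLen n pos : Nat) : List String :=
  if h : pos < n then
    if hk : pvSearchB cs wset pos (min n (pos + maxLen)) > pos then
      String.ofList ((cs.drop pos).take (pvSearchB cs wset pos (min n (pos + maxLen)) - pos))
        :: pvGoB cs wset maxLen n (pvSearchB cs wset pos (min n (pos + maxLen)))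
    else
      String.ofList ((cs.drop pos).take 1) :: pvGoB cs wset maxLen n (pos + 1)
  else []
termination_by n - pos
decreasing_by
  · have := pvSearchB_bounds cs wset pos (min n (pos + maxLen)) (by omega)
    omega
  · omega

def max_match_segmentation_alt (sentence : String) (word_dict : List String) : List String :=
  let wset := PySem.Set.ofList word_dict
  let maxLen := (word_dict.map String.length).foldr Nat.max 0
  pvGoB sentence.toList wset maxLen sentence.toList.length 0

-- ===== PRECONDITION & SPEC =====
def Spec_max_match_segmentation (sentence : String) (word_dict : List String) (out : List String) : Prop := out = max_match_segmentation_alt sentence word_dict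
instance (sentence : String) (word_dict : List String) (out : List String) : Decidable (Spec_max_match_segmentation sentence word_dict out) := by unfold Spec_max_match_segmentation; infer_instance

-- ===== CLAIM (what is proved, stated in full; the proofs are below) =====
def Claim_equal_max_match_segmentation : Prop := ∀ (sentence : String) (word_dict : List String), Dom_max_match_segmentation sentence word_dict → Spec_max_match_segmentation sentence word_dict (max_match_segmentation sentence word_dict)

-- ===== LEMMAS AND PROOFS =====

theorem pvMaxLen_spec (word_dict : List String) (w : String) (hw : w ∈ word_dict) :
    w.length ≤ (word_dict.map String.length).foldr Nat.max 0 := by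
  induction word_dict with
  | nil => simp at hw
  | cons x xs ih =>
    simp only [List.map_cons, List.foldr_cons]
    rcases List.mem_cons.mp hw with h | h
    · subst h; exact Nat.le_max_left _ _
    · exact Nat.le_trans (ih h) (Nat.le_max_right _ _)

-- B's inner while ≡ A's inner for-else, shifted by pos
theorem pvSearchB_eq_tryA (cs : List Char) (word_dict : List String) (pos k : Nat)
    (hk : pos ≤ k) :
    pvSearchB cs (PySem.Set.ofList word_dict) pos k
      = pos + (match pvTryA (cs.drop pos) word_dict (k - pos) with
               | some j => j
               | none => 0) := by
  induction k with
  | zero =>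
    have hp0 : pos = 0 := by omega
    subst hp0
    simp [pvSearchB, pvTryA]
  | succ k ih =>
    rcases Nat.lt_or_ge pos (k + 1) with h | h
    · have hpk : k + 1 - pos = (k - pos) + 1 := by omega
      rw [hpk]
      conv_lhs => rw [pvSearchB]
      rw [if_pos h, hpk]
      by_cases hmem : String.ofList ((cs.drop pos).take (k - pos + 1)) ∈ word_dict
      · rw [if_pos (by simpa [PySem.Set.contains_iff] using hmem)]
        conv_rhs => rw [pvTryA]
        rw [if_pos hmem]
        show k + 1 = pos + (k - pos + 1)
        omega
      · rw [if_neg (by simpa [PySem.Set.contains_iff] using hmem)]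
        conv_rhs => rw [pvTryA]
        rw [if_neg hmem]
        exact ih (by omega)
    · have hpe : pos = k + 1 := by omega
      subst hpe
      simp [pvSearchB, pvTryA]

-- candidate lengths above maxLen never match: A's loop from s.length equals B's loop from the min
theorem pvTryA_cut (s : List Char) (word_dict : List String) (maxLen : Nat)
    (hmax : ∀ w ∈ word_dict, w.length ≤ maxLen) (i : Nat) (hi : i ≤ s.length) :
    pvTryA s word_dict i = pvTryA s word_dict (min i maxLen) := by
  induction i with
  | zero => simp
  | succ i ih =>
    rcases Nat.lt_or_ge maxLen (i + 1) with h | h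
    · have hnot : String.ofList (s.take (i + 1)) ∉ word_dict := by
        intro hmem
        have hlen := hmax _ hmem
        rw [String.length_ofList, List.length_take] at hlen
        omega
      simp only [pvTryA, if_neg hnot]
      rw [ih (by omega)]
      congr 1
      omega
    · rw [Nat.min_eq_left (by omega)]

theorem pvGoB_eq_goA (cs : List Char) (word_dict : List String) (fuel pos : Nat)
    (hpos : pos ≤ cs.length) (hfuel : cs.length - pos ≤ fuel) :
    pvGoB cs (PySem.Set.ofList word_dict) ((word_dict.map String.length).foldr Nat.max 0)
        cs.length pos
      = pvGoA (cs.drop pos) word_dict := by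
  induction fuel generalizing pos with
  | zero =>
    have hpe : pos = cs.length := by omega
    subst hpe
    rw [pvGoB, dif_neg (by omega)]
    simp [pvGoA]
  | succ fuel ih =>
    by_cases hlt : pos < cs.length
    case neg =>
      have hpe : pos = cs.length := by omega
      subst hpe
      rw [pvGoB, dif_neg (by omega)]
      simp [pvGoA]
    set maxLen := (word_dict.map String.length).foldr Nat.max 0 with hm
    have hdroplen : (cs.drop pos).length = cs.length - pos := by simp
    have hcut := pvTryA_cut (cs.drop pos) word_dict maxLen
      (fun w hw => pvMaxLen_spec word_dict w hw) (cs.length - pos) (by omega)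
    have hmineq : min (cs.length - pos) maxLen = min cs.length (pos + maxLen) - pos := by omega
    have hsearch := pvSearchB_eq_tryA cs word_dict pos (min cs.length (pos + maxLen)) (by omega)
    rw [← hmineq] at hsearch
    obtain ⟨c, rest, hcr⟩ : ∃ c rest, cs.drop pos = c :: rest := by
      cases hd : cs.drop pos with
      | nil => exfalso; have := congrArg List.length hd; simp at this; omega
      | cons c rest => exact ⟨c, rest, rfl⟩
    rw [pvGoB, dif_pos hlt]
    cases htry : pvTryA (cs.drop pos) word_dict (min (cs.length - pos) maxLen) with
    | some j =>
      have hjb := pvTryA_bounds htry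
      rw [htry] at hsearch
      have hs2 : pvSearchB cs (PySem.Set.ofList word_dict) pos (min cs.length (pos + maxLen))
          = pos + j := hsearch
      rw [hs2, dif_pos (by omega)]
      have htake : (cs.drop pos).take (pos + j - pos) = (cs.drop pos).take j := by
        congr 1; omega
      have hgoA : pvGoA (cs.drop pos) word_dict
          = String.ofList ((cs.drop pos).take j) :: pvGoA ((cs.drop pos).drop j) word_dict := by
        rw [hcr, pvGoA]
        have hstep : pvTryA (c :: rest) word_dict (c :: rest).length = some j := by
          rw [← hcr, hdroplen, hcut]; exact htry
        split
        · rename_i i heq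
          rw [hstep] at heq
          cases heq
          rfl
        · rename_i heq
          rw [hstep] at heq
          cases heq
      rw [hgoA, htake]
      have hdd : (cs.drop pos).drop j = cs.drop (pos + j) := by
        rw [List.drop_drop, Nat.add_comm]
      rw [hdd, ih (pos + j) (by omega) (by omega)]
    | none =>
      rw [htry] at hsearch
      have hs2 : pvSearchB cs (PySem.Set.ofList word_dict) pos (min cs.length (pos + maxLen))
          = pos := hsearch
      rw [hs2, dif_neg (by omega)]
      have hgoA : pvGoA (cs.drop pos) word_dict
          = String.ofList [c] :: pvGoA rest word_dict := by
        rw [hcr, pvGoA]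
        have hstep : pvTryA (c :: rest) word_dict (c :: rest).length = none := by
          rw [← hcr, hdroplen, hcut]; exact htry
        split
        · rename_i i heq
          rw [hstep] at heq
          cases heq
        · rfl
      have htake1 : (cs.drop pos).take 1 = [c] := by rw [hcr]; rfl
      have hrest : rest = cs.drop (pos + 1) := by
        have := congrArg (List.drop 1) hcr
        simpa [List.drop_drop, Nat.add_comm] using this.symm
      rw [hgoA, htake1, ih (pos + 1) (by omega) (by omega), ← hrest]

-- ===== VERDICT (by name: the statement is the Claim_ definition above) =====
theorem max_match_segmentation_spec : Claim_equal_max_match_segmentation := by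
  intro sentence word_dict _
  unfold Spec_max_match_segmentation max_match_segmentation max_match_segmentation_alt
  have h := pvGoB_eq_goA sentence.toList word_dict sentence.toList.length 0 (by omega) (by omega)
  simpa using h.symm
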